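-- pv_equiv track=rewrite | github.com/sssseulg2/algorithm | programmers/42626.py | solution
-- ===== SOURCE A (Python) =====
-- import heapq
--
-- def solution(scoville, K):
--     answer = 0
--
--     heapq.heapify(scoville)
--     while scoville[0] < K:
--         heapq.heappush(scoville, heapq.heappop(scoville) + (heapq.heappop(scoville)*2))
--         answer += 1
--         if len(scoville) < 2 and scoville[0]<K:
--             return -1
--
--     return answer
-- ===== SOURCE B (Python) =====
-- def solution(scoville, K):
--     # Sort once, then run the classic two-queue greedy: originals are consumed
--     # front-to-back from the sorted list, merge results are appended to a FIFO
--     # queue (they come out in usable order), and the overall minimum is always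
--     # one of the two queue fronts -- no heap and no repeated insertion.
--     s = sorted(scoville)
--     merged = []
--     i = j = 0
--
--     def take_s():
--         return i < len(s) and (j >= len(merged) or s[i] <= merged[j])
--
--     def front():
--         return s[i] if take_s() else merged[j]
--
--     def pop():
--         nonlocal i, j
--         if take_s():
--             i += 1
--             return s[i - 1]
--         j += 1
--         return merged[j - 1]
--
--     answer = 0
--     while front() < K:
--         a = pop()
--         b = pop()
--         merged.append(a + 2 * b)
--         answer += 1
--         if (len(s) - i) + (len(merged) - j) < 2 and front() < K:
--             return -1
--     return answer
-- ===== Notes on version B (the rewrite author's own statement) =====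
-- stated objective: alternative
-- what changed: Replaces the heap entirely with the classic two-queue greedy: sort once, then consume the sorted originals front-to-back and append each merge result to a FIFO queue, taking the minimum of the two queue fronts in O(1) per step instead of maintaining a priority structure; A also heapifies the caller's list in place while B leaves it untouched.
import Mathlib
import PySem

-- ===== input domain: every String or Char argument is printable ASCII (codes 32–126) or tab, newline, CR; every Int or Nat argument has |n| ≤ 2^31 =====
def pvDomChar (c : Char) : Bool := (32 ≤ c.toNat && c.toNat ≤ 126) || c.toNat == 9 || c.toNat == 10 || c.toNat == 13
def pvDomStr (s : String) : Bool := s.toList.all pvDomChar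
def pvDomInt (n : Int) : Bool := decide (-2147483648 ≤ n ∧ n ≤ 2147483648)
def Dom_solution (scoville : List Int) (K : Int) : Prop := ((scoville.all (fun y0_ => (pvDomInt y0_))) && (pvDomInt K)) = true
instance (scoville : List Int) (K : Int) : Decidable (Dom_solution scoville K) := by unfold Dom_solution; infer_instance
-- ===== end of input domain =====

-- B drops the heap altogether: sort once, then run the two-queue greedy (sorted originals
-- consumed front-to-back, merge results appended to a FIFO queue, minimum = one of the two
-- fronts). Equivalence is about the RETURN value only: A heapifies the caller's list in
-- place, B does not mutate it.

-- ===== PORT A =====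
-- heapq is ported as a min-heap (skew heap): heapify/heappop/heappush are the corresponding
-- heap operations; the return value of A depends on the heap only through them.
inductive SkewHeap where
  | nil : SkewHeap
  | node : Int → SkewHeap → SkewHeap → SkewHeap
deriving DecidableEq, Repr

def SkewHeap.size : SkewHeap → Nat
  | .nil => 0
  | .node _ l r => 1 + l.size + r.size

def SkewHeap.merge : SkewHeap → SkewHeap → SkewHeap
  | .nil, h => h
  | .node a l1 r1, .nil => .node a l1 r1
  | .node a l1 r1, .node b l2 r2 =>
    if a ≤ b then .node a (SkewHeap.merge r1 (.node b l2 r2)) l1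
    else .node b (SkewHeap.merge (.node a l1 r1) r2) l2
termination_by h1 h2 => h1.size + h2.size
decreasing_by all_goals (simp [SkewHeap.size]; try omega)

def SkewHeap.push (h : SkewHeap) (v : Int) : SkewHeap := h.merge (.node v .nil .nil)

-- heap root; Python's scoville[0] raises IndexError on an empty heap, excluded by Pre_
def SkewHeap.root : SkewHeap → Int
  | .nil => 0
  | .node v _ _ => v

-- heappop; Python raises IndexError on an empty heap, excluded by Pre_
def SkewHeap.popMin : SkewHeap → Int × SkewHeap
  | .nil => (0, .nil)
  | .node v l r => (v, l.merge r)

def SkewHeap.heapify (xs : List Int) : SkewHeap := xs.foldl SkewHeap.push .nil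

-- the while loop; fuel = initial list length bounds the iteration count (size drops by 1 each round)
def solutionLoop (K : Int) : Nat → Int → SkewHeap → Int
  | 0, ans, _ => ans
  | fuel+1, ans, h =>
    if h.root < K then
      let p1 := h.popMin
      let p2 := p1.2.popMin
      let h3 := p2.2.push (p1.1 + p2.1 * 2)
      if h3.size < 2 ∧ h3.root < K then -1
      else solutionLoop K fuel (ans + 1) h3
    else ans

def solution (scoville : List Int) (K : Int) : Int :=
  solutionLoop K scoville.length 0 (SkewHeap.heapify scoville)

-- ===== PORT B =====
-- Source B's front(): smaller of the two queue fronts (ties to the sorted originals);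
-- both queues empty is Python's IndexError, excluded by Pre_
def frontVal : List Int → List Int → Int
  | a :: _, [] => a
  | a :: _, m :: _ => if a ≤ m then a else m
  | [], m :: _ => m
  | [], [] => 0

-- Source B's pop(): remove and return the smaller front
def popQ : List Int → List Int → Int × List Int × List Int
  | a :: S, [] => (a, S, [])
  | a :: S, m :: M => if a ≤ m then (a, S, m :: M) else (m, a :: S, M)
  | [], m :: M => (m, [], M)
  | [], [] => (0, [], [])

-- Source B's while loop over the two queues (S = unconsumed sorted originals, M = merge queue)
def altLoop (K : Int) : Nat → Int → List Int → List Int → Int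
  | 0, ans, _, _ => ans
  | fuel+1, ans, S, M =>
    if frontVal S M < K then
      let p1 := popQ S M
      let p2 := popQ p1.2.1 p1.2.2
      let M3 := p2.2.2 ++ [p1.1 + 2 * p2.1]
      if p2.2.1.length + M3.length < 2 ∧ frontVal p2.2.1 M3 < K then -1
      else altLoop K fuel (ans + 1) p2.2.1 M3
    else ans

def solution_alt (scoville : List Int) (K : Int) : Int :=
  altLoop K scoville.length 0 (PySem.List.sorted scoville (fun x => x) false) []

-- ===== PRECONDITION & SPEC =====
-- Pre_ excludes exactly the inputs on which A raises IndexError: the empty list, and a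
-- single-element list whose element is below K (the second heappop fails); B raises there too.
def Pre_solution (scoville : List Int) (K : Int) : Prop :=
  scoville ≠ [] ∧ (scoville.length = 1 → ∀ x ∈ scoville, K ≤ x)
instance (scoville : List Int) (K : Int) : Decidable (Pre_solution scoville K) := by unfold Pre_solution; infer_instance

def pvWitness_solution : List Int × Int := ([1, 2, 3, 9, 10, 12], 7)

def Spec_solution (scoville : List Int) (K : Int) (out : Int) : Prop := out = solution_alt scoville K
instance (scoville : List Int) (K : Int) (out : Int) : Decidable (Spec_solution scoville K out) := by unfold Spec_solution; infer_instance

-- ===== CLAIM (what is proved, stated in full; the proofs are below) =====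
def Claim_equal_solution : Prop := ∀ (scoville : List Int) (K : Int), Dom_solution scoville K → Pre_solution scoville K → Spec_solution scoville K (solution scoville K)

-- ===== LEMMAS AND PROOFS =====

def SkewHeap.mset : SkewHeap → Multiset Int
  | .nil => 0
  | .node v l r => v ::ₘ (l.mset + r.mset)

def SkewHeap.IsHeap : SkewHeap → Prop
  | .nil => True
  | .node v l r => (∀ x ∈ l.mset, v ≤ x) ∧ (∀ x ∈ r.mset, v ≤ x) ∧ l.IsHeap ∧ r.IsHeap

theorem mset_merge (h1 h2 : SkewHeap) : (h1.merge h2).mset = h1.mset + h2.mset := by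
  induction h1, h2 using SkewHeap.merge.induct with
  | case1 h => simp [SkewHeap.merge, SkewHeap.mset]
  | case2 a l1 r1 => simp [SkewHeap.merge, SkewHeap.mset]
  | case3 a l1 r1 b l2 r2 hle ih =>
    simp only [SkewHeap.merge, if_pos hle, SkewHeap.mset, ih,
      ← Multiset.singleton_add]
    abel
  | case4 a l1 r1 b l2 r2 hle ih =>
    simp only [SkewHeap.merge, if_neg hle, SkewHeap.mset, ih,
      ← Multiset.singleton_add]
    abel

theorem isHeap_merge (h1 h2 : SkewHeap) (H1 : h1.IsHeap) (H2 : h2.IsHeap) :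
    (h1.merge h2).IsHeap := by
  induction h1, h2 using SkewHeap.merge.induct with
  | case1 h => simpa [SkewHeap.merge] using H2
  | case2 a l1 r1 => simpa [SkewHeap.merge] using H1
  | case3 a l1 r1 b l2 r2 hle ih =>
    obtain ⟨hL, hR, HL, HR⟩ := H1
    simp only [SkewHeap.merge, if_pos hle, SkewHeap.IsHeap]
    refine ⟨?_, hL, ih HR H2, HL⟩
    intro x hx
    rw [mset_merge] at hx
    rcases Multiset.mem_add.1 hx with hx | hx
    · exact hR x hx
    · obtain ⟨hbL, hbR, _, _⟩ := H2
      simp only [SkewHeap.mset, Multiset.mem_cons, Multiset.mem_add] at hx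
      rcases hx with rfl | hx | hx
      · exact hle
      · exact le_trans hle (hbL x hx)
      · exact le_trans hle (hbR x hx)
  | case4 a l1 r1 b l2 r2 hle ih =>
    obtain ⟨hbL, hbR, HbL, HbR⟩ := H2
    have hba : b ≤ a := le_of_not_ge (fun h => hle h)
    simp only [SkewHeap.merge, if_neg hle, SkewHeap.IsHeap]
    refine ⟨?_, hbL, ih H1 HbR, HbL⟩
    intro x hx
    rw [mset_merge] at hx
    rcases Multiset.mem_add.1 hx with hx | hx
    · obtain ⟨hL, hR, _, _⟩ := H1
      simp only [SkewHeap.mset, Multiset.mem_cons, Multiset.mem_add] at hx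
      rcases hx with rfl | hx | hx
      · exact hba
      · exact le_trans hba (hL x hx)
      · exact le_trans hba (hR x hx)
    · exact hbR x hx

theorem root_le (h : SkewHeap) (H : h.IsHeap) : ∀ x ∈ h.mset, h.root ≤ x := by
  cases h with
  | nil => simp [SkewHeap.mset]
  | node v l r =>
    obtain ⟨hL, hR, _, _⟩ := H
    intro x hx
    simp only [SkewHeap.mset, Multiset.mem_cons, Multiset.mem_add] at hx
    rcases hx with rfl | hx | hx
    · exact le_refl _
    · exact hL x hx
    · exact hR x hx

theorem root_mem (h : SkewHeap) (hne : h ≠ .nil) : h.root ∈ h.mset := by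
  cases h with
  | nil => exact absurd rfl hne
  | node v l r => simp [SkewHeap.mset, SkewHeap.root]

theorem ne_nil_of_mset (h : SkewHeap) (hm : h.mset ≠ 0) : h ≠ .nil := by
  intro heq; subst heq; exact hm rfl

theorem size_eq_card (h : SkewHeap) : h.size = Multiset.card h.mset := by
  induction h with
  | nil => rfl
  | node v l r ihl ihr => simp [SkewHeap.size, SkewHeap.mset, ihl, ihr]; omega

theorem mset_popMin (h : SkewHeap) (hne : h ≠ .nil) :
    h.mset = h.root ::ₘ (h.popMin).2.mset := by
  cases h with
  | nil => exact absurd rfl hne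
  | node v l r => simp [SkewHeap.mset, SkewHeap.root, SkewHeap.popMin, mset_merge]

theorem isHeap_popMin (h : SkewHeap) (H : h.IsHeap) : (h.popMin).2.IsHeap := by
  cases h with
  | nil => trivial
  | node v l r =>
    obtain ⟨_, _, HL, HR⟩ := H
    exact isHeap_merge l r HL HR

theorem isHeap_push (h : SkewHeap) (v : Int) (H : h.IsHeap) : (h.push v).IsHeap := by
  refine isHeap_merge h _ H ?_
  simp [SkewHeap.IsHeap, SkewHeap.mset]

theorem mset_push (h : SkewHeap) (v : Int) : (h.push v).mset = v ::ₘ h.mset := by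
  simp only [SkewHeap.push, mset_merge, SkewHeap.mset]
  rw [Multiset.add_comm]
  simp

theorem heapify_invariant (xs : List Int) : ∀ (h : SkewHeap), h.IsHeap →
    (xs.foldl SkewHeap.push h).IsHeap ∧ (xs.foldl SkewHeap.push h).mset = h.mset + ↑xs := by
  induction xs with
  | nil => intro h H; simpa using H
  | cons x xs ih =>
    intro h H
    obtain ⟨H', hm⟩ := ih (h.push x) (isHeap_push h x H)
    refine ⟨by simpa using H', ?_⟩
    simp only [List.foldl_cons] at *
    rw [hm, mset_push, ← Multiset.cons_coe]
    simp only [← Multiset.singleton_add]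
    abel

-- two-queue facts
theorem frontVal_mem (S M : List Int) (h : S ++ M ≠ []) : frontVal S M ∈ S ++ M := by
  cases S with
  | nil => cases M with
    | nil => simp at h
    | cons m M => simp [frontVal]
  | cons a S => cases M with
    | nil => simp [frontVal]
    | cons m M =>
      simp only [frontVal]
      split <;> simp

theorem frontVal_le (S M : List Int) (hS : S.Sorted (· ≤ ·)) (hM : M.Sorted (· ≤ ·)) :
    ∀ z ∈ S ++ M, frontVal S M ≤ z := by
  intro z hz
  cases S with
  | nil => cases M with
    | nil => simp at hz
    | cons m M =>
      simp only [List.nil_append] at hz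
      rcases List.mem_cons.1 hz with rfl | hz
      · exact le_refl _
      · exact (List.sorted_cons.1 hM).1 z hz
  | cons a S => cases M with
    | nil =>
      simp only [List.append_nil] at hz
      rcases List.mem_cons.1 hz with rfl | hz
      · exact le_refl _
      · exact (List.sorted_cons.1 hS).1 z hz
    | cons m M =>
      simp only [frontVal]
      rcases List.mem_append.1 hz with hz | hz
      · rcases List.mem_cons.1 hz with rfl | hz
        · split
          · exact le_refl _
          · exact le_of_lt (lt_of_not_ge (by assumption))
        · have := (List.sorted_cons.1 hS).1 z hz
          split
          · omega
          · have h2 : m ≤ a := le_of_lt (lt_of_not_ge (by assumption))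
            omega
      · rcases List.mem_cons.1 hz with rfl | hz
        · split
          · assumption
          · exact le_refl _
        · have := (List.sorted_cons.1 hM).1 z hz
          split
          · rename_i ham; exact le_trans ham this
          · exact this

theorem popQ_val (S M : List Int) : (popQ S M).1 = frontVal S M := by
  cases S <;> cases M <;> simp [popQ, frontVal] <;> split <;> rfl

theorem popQ_mset (S M : List Int) (h : S ++ M ≠ []) :
    (↑(S ++ M) : Multiset Int) = (popQ S M).1 ::ₘ ↑((popQ S M).2.1 ++ (popQ S M).2.2) := by
  cases S with
  | nil => cases M with
    | nil => simp at h
    | cons m M => simp [popQ]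
  | cons a S => cases M with
    | nil => simp [popQ]
    | cons m M =>
      simp only [popQ]
      split
      · simp
      · show (↑(a :: S ++ m :: M) : Multiset Int) = m ::ₘ ↑((a :: S) ++ M)
        rw [Multiset.cons_coe]
        exact Multiset.coe_eq_coe.2 List.perm_middle

theorem popQ_sorted_S (S M : List Int) (hS : S.Sorted (· ≤ ·)) :
    (popQ S M).2.1.Sorted (· ≤ ·) := by
  cases S with
  | nil => cases M <;> simp [popQ, List.sorted_nil]
  | cons a S => cases M with
    | nil => exact (List.sorted_cons.1 hS).2
    | cons m M =>
      simp only [popQ]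
      split
      · exact (List.sorted_cons.1 hS).2
      · exact hS

theorem popQ_sorted_M (S M : List Int) (hM : M.Sorted (· ≤ ·)) :
    (popQ S M).2.2.Sorted (· ≤ ·) := by
  cases S with
  | nil => cases M with
    | nil => simp [popQ, List.sorted_nil]
    | cons m M => exact (List.sorted_cons.1 hM).2
  | cons a S => cases M with
    | nil => simp [popQ, List.sorted_nil]
    | cons m M =>
      simp only [popQ]
      split
      · exact hM
      · exact (List.sorted_cons.1 hM).2

theorem popQ_M_sub (S M : List Int) : ∀ z ∈ (popQ S M).2.2, z ∈ M := by
  cases S with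
  | nil => cases M with
    | nil => simp [popQ]
    | cons m M => intro z hz; exact List.mem_cons_of_mem _ hz
  | cons a S => cases M with
    | nil => simp [popQ]
    | cons m M =>
      simp only [popQ]
      split
      · intro z hz; exact hz
      · intro z hz; exact List.mem_cons_of_mem _ hz

theorem root_eq_front (h : SkewHeap) (S M : List Int)
    (hm : h.mset = (↑(S ++ M) : Multiset Int)) (H : h.IsHeap)
    (hS : S.Sorted (· ≤ ·)) (hM : M.Sorted (· ≤ ·)) (hne : S ++ M ≠ []) :
    h.root = frontVal S M := by
  have hne' : h ≠ .nil := ne_nil_of_mset h (by simp [hm, hne])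
  have h1 : h.root ≤ frontVal S M :=
    root_le h H _ (by rw [hm]; exact Multiset.mem_coe.2 (frontVal_mem S M hne))
  have h2 : frontVal S M ≤ h.root := by
    have hmem := root_mem h hne'
    rw [hm] at hmem
    exact frontVal_le S M hS hM _ (Multiset.mem_coe.1 hmem)
  omega

-- the merge-queue invariant: any pending merged value is at most x + 2y for any
-- two other pending elements x ≤ y (hence at most the next merge result)
def QInv (S M : List Int) : Prop :=
  ∀ m x y : Int, m ∈ M → x ≤ y →
    (m ::ₘ x ::ₘ {y} : Multiset Int) ≤ ↑(S ++ M) → m ≤ x + 2 * y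

theorem le_add_single (T Q : Multiset Int) (v : Int) (h : T ≤ Q + {v}) :
    T ≤ Q ∨ (v ∈ T ∧ T.erase v ≤ Q) := by
  by_cases hc : T.count v ≤ Q.count v
  · left
    rw [Multiset.le_iff_count]
    intro z
    have := (Multiset.le_iff_count.1 h) z
    rw [Multiset.count_add, Multiset.count_singleton] at this
    by_cases hz : z = v
    · subst hz; exact hc
    · simp [hz] at this; omega
  · right
    have hv : v ∈ T := by
      rw [← Multiset.count_pos]
      omega
    refine ⟨hv, ?_⟩
    rw [Multiset.le_iff_count]
    intro z
    have := (Multiset.le_iff_count.1 h) z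
    rw [Multiset.count_add, Multiset.count_singleton] at this
    by_cases hz : z = v
    · subst hz
      rw [Multiset.count_erase_self]
      simp at this
      omega
    · rw [Multiset.count_erase_of_ne hz]
      simp only [hz, if_false] at this
      omega

theorem inv_pres (S M S2 M2 : List Int) (a b : Int)
    (hmul : (↑(S ++ M) : Multiset Int) = a ::ₘ b ::ₘ ↑(S2 ++ M2))
    (hab : a ≤ b) (hb : ∀ z ∈ (↑(S2 ++ M2) : Multiset Int), b ≤ z)
    (hsub : ∀ z ∈ M2, z ∈ M)
    (hInv : QInv S M) : QInv S2 (M2 ++ [a + 2 * b]) := by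
  intro m x y hm hxy hle
  set v : Int := a + 2 * b with hv
  have hQv : (↑(S2 ++ (M2 ++ [v])) : Multiset Int) = ↑(S2 ++ M2) + {v} := by
    rw [← List.append_assoc]
    show (↑((S2 ++ M2) ++ [v]) : Multiset Int) = _
    rw [← Multiset.coe_add]
    rfl
  rw [hQv] at hle
  -- facts about an old pending merged value
  have old_facts : ∀ m' : Int, m' ∈ M2 → b ≤ m' ∧ m' ≤ v := by
    intro m' hm'
    have hm'Q : m' ∈ (↑(S2 ++ M2) : Multiset Int) :=
      Multiset.mem_coe.2 (List.mem_append.2 (Or.inr hm'))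
    refine ⟨hb m' hm'Q, ?_⟩
    apply hInv m' a b (hsub m' hm') hab
    rw [hmul]
    have : (m' ::ₘ a ::ₘ {b} : Multiset Int) = a ::ₘ b ::ₘ {m'} := by
      show m' ::ₘ a ::ₘ b ::ₘ 0 = a ::ₘ b ::ₘ m' ::ₘ 0
      rw [Multiset.cons_swap m' a, Multiset.cons_swap m' b]
    rw [this]
    exact Multiset.cons_le_cons _ (Multiset.cons_le_cons _ (Multiset.singleton_le.2 hm'Q))
  rcases List.mem_append.1 hm with hmM2 | hmv
  · -- old pending merged value m
    obtain ⟨hbm, hmvle⟩ := old_facts m hmM2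
    rcases le_add_single _ _ _ hle with hcase | ⟨hvT, herase⟩
    · -- pair taken entirely from the old pending elements: use Inv at the previous state
      apply hInv m x y (hsub m hmM2) hxy
      rw [hmul]
      exact le_trans hcase (le_trans (Multiset.le_cons_self _ _)
        (Multiset.cons_le_cons _ (Multiset.le_cons_self _ _)))
    · -- one of m, x, y is the fresh merge result v
      rcases Multiset.mem_cons.1 hvT with hveq | hvT'
      · -- m = v (as a value)
        have hxQ : x ∈ (↑(S2 ++ M2) : Multiset Int) := by
          have : x ∈ (m ::ₘ x ::ₘ {y} : Multiset Int).erase v := by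
            rw [← hveq, Multiset.erase_cons_head]
            simp
          exact Multiset.mem_of_le herase this
        have hyQ : y ∈ (↑(S2 ++ M2) : Multiset Int) := by
          have : y ∈ (m ::ₘ x ::ₘ {y} : Multiset Int).erase v := by
            rw [← hveq, Multiset.erase_cons_head]
            simp
          exact Multiset.mem_of_le herase this
        have hbx := hb x hxQ
        have hby := hb y hyQ
        omega
      rcases Multiset.mem_cons.1 hvT' with hveq | hvT''
      · -- x = v
        have hyQ : y ∈ (↑(S2 ++ M2) : Multiset Int) := by
          have heq : (m ::ₘ x ::ₘ {y} : Multiset Int) = v ::ₘ m ::ₘ {y} := by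
            rw [← hveq, Multiset.cons_swap]
          have : y ∈ (m ::ₘ x ::ₘ {y} : Multiset Int).erase v := by
            rw [heq, Multiset.erase_cons_head]
            simp
          exact Multiset.mem_of_le herase this
        have hby := hb y hyQ
        omega
      · -- y = v
        have hveq' : v = y := by simpa using hvT''
        have hveq : y = v := hveq'.symm
        have hxQ : x ∈ (↑(S2 ++ M2) : Multiset Int) := by
          have heq : (m ::ₘ x ::ₘ {y} : Multiset Int) = v ::ₘ m ::ₘ {x} := by
            rw [← hveq]
            show m ::ₘ x ::ₘ y ::ₘ 0 = y ::ₘ m ::ₘ x ::ₘ 0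
            rw [Multiset.cons_swap x y, Multiset.cons_swap m y]
          have : x ∈ (m ::ₘ x ::ₘ {y} : Multiset Int).erase v := by
            rw [heq, Multiset.erase_cons_head]
            simp
          exact Multiset.mem_of_le herase this
        have hbx := hb x hxQ
        omega
  · -- m is the fresh merge result v
    have hmeq : m = v := by simpa using hmv
    subst hmeq
    rcases le_add_single _ _ _ hle with hcase | ⟨_, herase⟩
    · have hxQ : x ∈ (↑(S2 ++ M2) : Multiset Int) :=
        Multiset.mem_of_le hcase (by simp)
      have hyQ : y ∈ (↑(S2 ++ M2) : Multiset Int) :=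
        Multiset.mem_of_le hcase (by simp)
      have hbx := hb x hxQ
      have hby := hb y hyQ
      omega
    · have hxQ : x ∈ (↑(S2 ++ M2) : Multiset Int) := by
        have : x ∈ (v ::ₘ x ::ₘ {y} : Multiset Int).erase v := by
          rw [Multiset.erase_cons_head]; simp
        exact Multiset.mem_of_le herase this
      have hyQ : y ∈ (↑(S2 ++ M2) : Multiset Int) := by
        have : y ∈ (v ::ₘ x ::ₘ {y} : Multiset Int).erase v := by
          rw [Multiset.erase_cons_head]; simp
        exact Multiset.mem_of_le herase this
      have hbx := hb x hxQ
      have hby := hb y hyQ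
      omega

theorem merged_le_next (S M S2 M2 : List Int) (a b : Int)
    (hmul : (↑(S ++ M) : Multiset Int) = a ::ₘ b ::ₘ ↑(S2 ++ M2))
    (hab : a ≤ b) (hsub : ∀ z ∈ M2, z ∈ M) (hInv : QInv S M) :
    ∀ m ∈ M2, m ≤ a + 2 * b := by
  intro m hm
  have hmQ : m ∈ (↑(S2 ++ M2) : Multiset Int) :=
    Multiset.mem_coe.2 (List.mem_append.2 (Or.inr hm))
  apply hInv m a b (hsub m hm) hab
  rw [hmul]
  have : (m ::ₘ a ::ₘ {b} : Multiset Int) = a ::ₘ b ::ₘ {m} := by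
    show m ::ₘ a ::ₘ b ::ₘ 0 = a ::ₘ b ::ₘ m ::ₘ 0
    rw [Multiset.cons_swap m a, Multiset.cons_swap m b]
  rw [this]
  exact Multiset.cons_le_cons _ (Multiset.cons_le_cons _ (Multiset.singleton_le.2 hmQ))

theorem solution_spec_loop (K : Int) (fuel : Nat) : ∀ (ans : Int) (S M : List Int) (h : SkewHeap),
    h.mset = (↑(S ++ M) : Multiset Int) → S.Sorted (· ≤ ·) → M.Sorted (· ≤ ·) → h.IsHeap →
    QInv S M → S ++ M ≠ [] → ((S ++ M).length = 1 → ∀ x ∈ S ++ M, K ≤ x) →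
    solutionLoop K fuel ans h = altLoop K fuel ans S M := by
  induction fuel with
  | zero => intro ans S M h _ _ _ _ _ _ _; rfl
  | succ fuel ih =>
    intro ans S M h hm hS hM H hInv hne hone
    have hroot : h.root = frontVal S M := root_eq_front h S M hm H hS hM hne
    simp only [solutionLoop, altLoop, hroot]
    by_cases hfK : frontVal S M < K
    · simp only [if_pos hfK]
      -- at least two pending elements (a single one would satisfy K ≤ it, contradicting hfK)
      have hlenpos : (S ++ M).length ≠ 0 := by
        intro h0
        exact hne (List.eq_nil_of_length_eq_zero h0)
      have hlen2 : 2 ≤ (S ++ M).length := by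
        by_contra hl
        have h1 : (S ++ M).length = 1 := by omega
        have hKf : K ≤ frontVal S M := hone h1 (frontVal S M) (frontVal_mem S M hne)
        omega
      -- first pop
      have hp1v : (popQ S M).1 = frontVal S M := popQ_val S M
      have hms1 : (↑(S ++ M) : Multiset Int)
          = (popQ S M).1 ::ₘ ↑((popQ S M).2.1 ++ (popQ S M).2.2) := popQ_mset S M hne
      have hhne : h ≠ .nil := ne_nil_of_mset h (by simp [hm, hne])
      have hcan1 : (h.popMin).2.mset = (↑((popQ S M).2.1 ++ (popQ S M).2.2) : Multiset Int) := by
        have hpop := mset_popMin h hhne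
        rw [hm, hms1, hroot, hp1v] at hpop
        exact (Multiset.cons_inj_right _).1 hpop.symm
      have hS1 : (popQ S M).2.1.Sorted (· ≤ ·) := popQ_sorted_S S M hS
      have hM1 : (popQ S M).2.2.Sorted (· ≤ ·) := popQ_sorted_M S M hM
      have hlen1 : ((popQ S M).2.1 ++ (popQ S M).2.2).length + 1 = (S ++ M).length := by
        have := congrArg Multiset.card hms1
        simpa using this.symm
      have hne1 : (popQ S M).2.1 ++ (popQ S M).2.2 ≠ [] := by
        intro h0
        rw [h0] at hlen1
        simp only [List.length_nil] at hlen1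
        omega
      -- second pop
      have H1 : (h.popMin).2.IsHeap := isHeap_popMin h H
      have hroot1 : (h.popMin).2.root = frontVal (popQ S M).2.1 (popQ S M).2.2 :=
        root_eq_front _ _ _ hcan1 H1 hS1 hM1 hne1
      have hp2v : (popQ (popQ S M).2.1 (popQ S M).2.2).1 = frontVal (popQ S M).2.1 (popQ S M).2.2 :=
        popQ_val _ _
      have hms2 : (↑((popQ S M).2.1 ++ (popQ S M).2.2) : Multiset Int)
          = (popQ (popQ S M).2.1 (popQ S M).2.2).1
            ::ₘ ↑((popQ (popQ S M).2.1 (popQ S M).2.2).2.1 ++ (popQ (popQ S M).2.1 (popQ S M).2.2).2.2) :=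
        popQ_mset _ _ hne1
      have hcan2 : ((h.popMin).2.popMin).2.mset
          = (↑((popQ (popQ S M).2.1 (popQ S M).2.2).2.1 ++ (popQ (popQ S M).2.1 (popQ S M).2.2).2.2) : Multiset Int) := by
        have h1ne : (h.popMin).2 ≠ .nil := ne_nil_of_mset _ (by simp [hcan1, hne1])
        have hpop := mset_popMin (h.popMin).2 h1ne
        rw [hcan1, hms2, hroot1, hp2v] at hpop
        exact (Multiset.cons_inj_right _).1 hpop.symm
      -- abbreviations for the popped values and the residual queues
      have hab : (popQ S M).1 ≤ (popQ (popQ S M).2.1 (popQ S M).2.2).1 := by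
        rw [hp1v, hp2v]
        apply frontVal_le S M hS hM
        have hmem2 : frontVal (popQ S M).2.1 (popQ S M).2.2 ∈ (↑((popQ S M).2.1 ++ (popQ S M).2.2) : Multiset Int) :=
          Multiset.mem_coe.2 (frontVal_mem _ _ hne1)
        have : frontVal (popQ S M).2.1 (popQ S M).2.2 ∈ (↑(S ++ M) : Multiset Int) := by
          rw [hms1]
          exact Multiset.mem_cons_of_mem hmem2
        exact Multiset.mem_coe.1 this
      have hbmin : ∀ z ∈ (↑((popQ (popQ S M).2.1 (popQ S M).2.2).2.1 ++ (popQ (popQ S M).2.1 (popQ S M).2.2).2.2) : Multiset Int),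
          (popQ (popQ S M).2.1 (popQ S M).2.2).1 ≤ z := by
        intro z hz
        rw [hp2v]
        apply frontVal_le _ _ hS1 hM1
        have : z ∈ (↑((popQ S M).2.1 ++ (popQ S M).2.2) : Multiset Int) := by
          rw [hms2]
          exact Multiset.mem_cons_of_mem hz
        exact Multiset.mem_coe.1 this
      have hmul : (↑(S ++ M) : Multiset Int)
          = (popQ S M).1 ::ₘ (popQ (popQ S M).2.1 (popQ S M).2.2).1
            ::ₘ ↑((popQ (popQ S M).2.1 (popQ S M).2.2).2.1 ++ (popQ (popQ S M).2.1 (popQ S M).2.2).2.2) := by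
        rw [hms1, hms2]
      have hsubM : ∀ z ∈ (popQ (popQ S M).2.1 (popQ S M).2.2).2.2, z ∈ M := by
        intro z hz
        exact popQ_M_sub S M z (popQ_M_sub _ _ z hz)
      have hInv3 := inv_pres _ _ _ _ _ _ hmul hab hbmin hsubM hInv
      have hvM := merged_le_next _ _ _ _ _ _ hmul hab hsubM hInv
      have hS2 : (popQ (popQ S M).2.1 (popQ S M).2.2).2.1.Sorted (· ≤ ·) :=
        popQ_sorted_S _ _ hS1
      have hM2 : (popQ (popQ S M).2.1 (popQ S M).2.2).2.2.Sorted (· ≤ ·) :=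
        popQ_sorted_M _ _ hM1
      have hM3 : ((popQ (popQ S M).2.1 (popQ S M).2.2).2.2
          ++ [(popQ S M).1 + 2 * (popQ (popQ S M).2.1 (popQ S M).2.2).1]).Sorted (· ≤ ·) := by
        refine List.pairwise_append.2 ⟨hM2, by simp, ?_⟩
        intro m hm w hw
        rw [List.mem_singleton.1 hw]
        exact hvM m hm
      -- the pushed heap matches the appended queue
      have hval : (popQ S M).1 + (popQ (popQ S M).2.1 (popQ S M).2.2).1 * 2
          = (popQ S M).1 + 2 * (popQ (popQ S M).2.1 (popQ S M).2.2).1 := by ring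
      have hms3 : (((h.popMin).2.popMin).2.push ((h.popMin).1 + ((h.popMin).2.popMin).1 * 2)).mset
          = (↑((popQ (popQ S M).2.1 (popQ S M).2.2).2.1
              ++ ((popQ (popQ S M).2.1 (popQ S M).2.2).2.2
                  ++ [(popQ S M).1 + 2 * (popQ (popQ S M).2.1 (popQ S M).2.2).1])) : Multiset Int) := by
        have e1 : (h.popMin).1 = (popQ S M).1 := by
          cases h with
          | nil => exact absurd rfl hhne
          | node v l r => simpa [SkewHeap.popMin, SkewHeap.root, hp1v] using hroot
        have e2 : ((h.popMin).2.popMin).1 = (popQ (popQ S M).2.1 (popQ S M).2.2).1 := by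
          have h1ne : (h.popMin).2 ≠ .nil := ne_nil_of_mset _ (by simp [hcan1, hne1])
          cases hpm : (h.popMin).2 with
          | nil => exact absurd hpm h1ne
          | node v l r =>
            have : v = frontVal (popQ S M).2.1 (popQ S M).2.2 := by
              simpa [hpm, SkewHeap.root] using hroot1
            simp [hpm, SkewHeap.popMin, this, hp2v]
        rw [e1, e2, mset_push, hcan2, hval, ← List.append_assoc]
        rw [Multiset.cons_coe]
        exact Multiset.coe_eq_coe.2 (List.perm_append_singleton _ _).symm
      have hne3 : (popQ (popQ S M).2.1 (popQ S M).2.2).2.1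
          ++ ((popQ (popQ S M).2.1 (popQ S M).2.2).2.2
              ++ [(popQ S M).1 + 2 * (popQ (popQ S M).2.1 (popQ S M).2.2).1]) ≠ [] := by
        simp
      have H3 : (((h.popMin).2.popMin).2.push ((h.popMin).1 + ((h.popMin).2.popMin).1 * 2)).IsHeap :=
        isHeap_push _ _ (isHeap_popMin _ H1)
      have hroot3 : (((h.popMin).2.popMin).2.push ((h.popMin).1 + ((h.popMin).2.popMin).1 * 2)).root
          = frontVal (popQ (popQ S M).2.1 (popQ S M).2.2).2.1
              ((popQ (popQ S M).2.1 (popQ S M).2.2).2.2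
                  ++ [(popQ S M).1 + 2 * (popQ (popQ S M).2.1 (popQ S M).2.2).1]) :=
        root_eq_front _ _ _ hms3 H3 hS2 hM3 hne3
      have hsize3 : (((h.popMin).2.popMin).2.push ((h.popMin).1 + ((h.popMin).2.popMin).1 * 2)).size
          = (popQ (popQ S M).2.1 (popQ S M).2.2).2.1.length
            + ((popQ (popQ S M).2.1 (popQ S M).2.2).2.2
                ++ [(popQ S M).1 + 2 * (popQ (popQ S M).2.1 (popQ S M).2.2).1]).length := by
        rw [size_eq_card, hms3]
        simp
      rw [hsize3, hroot3]
      by_cases hg : (popQ (popQ S M).2.1 (popQ S M).2.2).2.1.length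
            + ((popQ (popQ S M).2.1 (popQ S M).2.2).2.2
                ++ [(popQ S M).1 + 2 * (popQ (popQ S M).2.1 (popQ S M).2.2).1]).length < 2
          ∧ frontVal (popQ (popQ S M).2.1 (popQ S M).2.2).2.1
              ((popQ (popQ S M).2.1 (popQ S M).2.2).2.2
                  ++ [(popQ S M).1 + 2 * (popQ (popQ S M).2.1 (popQ S M).2.2).1]) < K
      · rw [if_pos hg, if_pos hg]
      · rw [if_neg hg, if_neg hg]
        apply ih (ans + 1) _ _ _ hms3 hS2 hM3 H3 hInv3 hne3
        intro hlen x hx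
        have hnotlt : ¬ frontVal (popQ (popQ S M).2.1 (popQ S M).2.2).2.1
            ((popQ (popQ S M).2.1 (popQ S M).2.2).2.2
                ++ [(popQ S M).1 + 2 * (popQ (popQ S M).2.1 (popQ S M).2.2).1]) < K := by
          intro hlt
          have hlen' : (popQ (popQ S M).2.1 (popQ S M).2.2).2.1.length
              + ((popQ (popQ S M).2.1 (popQ S M).2.2).2.2
                  ++ [(popQ S M).1 + 2 * (popQ (popQ S M).2.1 (popQ S M).2.2).1]).length = 1 := by
            simpa using hlen
          exact hg ⟨by omega, hlt⟩
        obtain ⟨w, hw⟩ := List.length_eq_one_iff.1 hlen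
        have hx' : x = w := by
          rw [hw] at hx
          simpa using hx
        have hf' : frontVal (popQ (popQ S M).2.1 (popQ S M).2.2).2.1
            ((popQ (popQ S M).2.1 (popQ S M).2.2).2.2
                ++ [(popQ S M).1 + 2 * (popQ (popQ S M).2.1 (popQ S M).2.2).1]) = w := by
          have := frontVal_mem _ _ hne3
          rw [hw] at this
          simpa using this
        rw [hx', ← hf']
        omega
    · simp only [if_neg hfK]

-- ===== VERDICT (by name: the statement is the Claim_ definition above) =====
theorem solution_spec : Claim_equal_solution := by
  intro scoville K _ hpre
  obtain ⟨hne, hone⟩ := hpre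
  unfold Spec_solution solution solution_alt
  obtain ⟨Hheap, Hmset⟩ := heapify_invariant scoville SkewHeap.nil trivial
  have hperm : (PySem.List.sorted scoville (fun x => x) false).Perm scoville :=
    PySem.List.sorted_perm scoville (fun x => x) false
  have hsort : (PySem.List.sorted scoville (fun x => x) false).Sorted (· ≤ ·) :=
    PySem.List.sorted_pairwise scoville (fun x => x)
  have hmEq : (SkewHeap.heapify scoville).mset
      = (↑(PySem.List.sorted scoville (fun x => x) false ++ ([] : List Int)) : Multiset Int) := by
    rw [SkewHeap.heapify, Hmset, List.append_nil]
    show (0 : Multiset Int) + ↑scoville = _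
    rw [zero_add]
    exact (Multiset.coe_eq_coe.2 hperm).symm
  have hlen : scoville.length = (PySem.List.sorted scoville (fun x => x) false).length :=
    hperm.length_eq.symm
  rw [hlen]
  refine solution_spec_loop K _ 0 _ [] _ hmEq hsort List.sorted_nil Hheap ?_ ?_ ?_
  · intro m x y hm _ _
    simp at hm
  · rw [List.append_nil]
    intro hnil
    apply hne
    have hleq := hperm.length_eq
    rw [hnil] at hleq
    exact List.eq_nil_of_length_eq_zero (by simpa using hleq.symm)
  · rw [List.append_nil]
    intro hl x hx
    have hleq := hperm.length_eq
    exact hone (by omega) x (hperm.mem_iff.1 hx)
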